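-- pv_equiv track=rewrite | github.com/mattc-try/wycheproof-pqc | parsing-gen/script_kyb.py | parse_nist_kat_file
-- ===== SOURCE A (Python) =====
-- def parse_nist_kat_file(content):
--     """Parses NIST KAT-style files (.req or .rsp)"""
--     test_cases = []
--     current_case = {}
--
--     for line in content.splitlines():
--         line = line.strip()
--         if not line or line.startswith('#'):
--             continue
--
--         if line.startswith('count ='):
--             if current_case:
--                 test_cases.append(current_case)
--             current_case = {}
--
--         if '=' in line:
--             key, value = line.split('=', 1)
--             key = key.strip()
--             value = value.strip()
--             current_case[key] = value
--
--     if current_case: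
--         test_cases.append(current_case)
--
--     return test_cases
-- ===== SOURCE B (Python) =====
-- def parse_nist_kat_file(content):
--     """Parses NIST KAT-style files (.req or .rsp)"""
--     # pass 1: clean lines (strip, drop blanks and comments)
--     lines = [s for s in (l.strip() for l in content.splitlines())
--              if s and not s.startswith('#')]
--     # pass 2: split into record groups; each 'count =' line opens a new group
--     groups = [[]]
--     for s in lines:
--         if s.startswith('count ='):
--             groups.append([])
--         groups[-1].append(s)
--     # pass 3: each group becomes a dict of its 'key = value' lines
--     result = []
--     for g in groups:
--         d = {}
--         for s in g:
--             if '=' in s: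
--                 k, v = s.split('=', 1)
--                 d[k.strip()] = v.strip()
--         if d:
--             result.append(d)
--     return result
-- ===== Notes on version B (the rewrite author's own statement) =====
-- stated objective: alternative
-- what changed: Replaces A's single stateful scan (current_case/flush bookkeeping) with a three-pass pipeline: clean the lines, split them into record groups at each 'count =' line, then turn each group into a dict and keep the non-empty ones.
import Mathlib
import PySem

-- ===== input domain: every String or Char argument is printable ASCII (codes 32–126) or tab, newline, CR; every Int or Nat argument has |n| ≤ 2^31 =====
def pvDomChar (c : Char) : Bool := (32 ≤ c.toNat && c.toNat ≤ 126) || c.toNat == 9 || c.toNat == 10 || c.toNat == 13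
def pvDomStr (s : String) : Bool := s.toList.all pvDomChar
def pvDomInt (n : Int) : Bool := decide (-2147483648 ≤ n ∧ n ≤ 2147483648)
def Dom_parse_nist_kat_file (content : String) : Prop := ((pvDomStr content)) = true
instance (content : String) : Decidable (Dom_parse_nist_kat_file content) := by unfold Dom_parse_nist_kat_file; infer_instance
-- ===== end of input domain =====

-- B is an alternative decomposition (clean / group at 'count =' / dict per group); same return value as A.

-- ===== PORT A =====
-- "if '=' in line: key, value = line.split('=',1); current_case[key.strip()] = value.strip()"
def kvInsert (cur : PySem.Dict String String) (line : String) : PySem.Dict String String :=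
  if PySem.Str.isIn "=" line then
    match PySem.Str.splitMax? line "=" 1 with
    | some (key :: value :: _) => cur.insert (PySem.Str.strip key) (PySem.Str.strip value)
    | _ => cur
  else cur

-- one iteration of A's loop over a raw line of the file
def katStepA (st : List (PySem.Dict String String) × PySem.Dict String String) (raw : String) :
    List (PySem.Dict String String) × PySem.Dict String String :=
  let line := PySem.Str.strip raw
  if line = "" || PySem.Str.startswith line "#" then st
  else
    let st' := if PySem.Str.startswith line "count =" then
                 ((if st.2.items = [] then st.1 else st.1 ++ [st.2]), PySem.Dict.empty)
               else st
    (st'.1, kvInsert st'.2 line)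

def parse_nist_kat_file (content : String) : List (List (String × String)) :=
  let st := (PySem.Str.splitlines content).foldl katStepA ([], PySem.Dict.empty)
  let tcs := if st.2.items = [] then st.1 else st.1 ++ [st.2]
  tcs.map (·.items)

-- ===== PORT B =====
def katKeep (s : String) : Bool := !(s = "") && !PySem.Str.startswith s "#"

-- "if s.startswith('count ='): groups.append([]) ; groups[-1].append(s)"
def katGrow (gs : List (List String)) (s : String) : List (List String) :=
  let gs := if PySem.Str.startswith s "count =" then gs ++ [[]] else gs
  gs.dropLast ++ [gs.getLastD [] ++ [s]]

def katBuild (g : List String) : PySem.Dict String String :=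
  g.foldl kvInsert PySem.Dict.empty

def parse_nist_kat_file_alt (content : String) : List (List (String × String)) :=
  let lines := ((PySem.Str.splitlines content).map PySem.Str.strip).filter katKeep
  let groups := lines.foldl katGrow [[]]
  (groups.foldl (fun res g =>
      let d := katBuild g
      if d.items = [] then res else res ++ [d]) []).map (·.items)

-- ===== PRECONDITION & SPEC =====
def Spec_parse_nist_kat_file (content : String) (out : List (List (String × String))) : Prop := out = parse_nist_kat_file_alt content
instance (content : String) (out : List (List (String × String))) : Decidable (Spec_parse_nist_kat_file content out) := by unfold Spec_parse_nist_kat_file; infer_instance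

-- ===== CLAIM (what is proved, stated in full; the proofs are below) =====
def Claim_equal_parse_nist_kat_file : Prop := ∀ (content : String), Dom_parse_nist_kat_file content → Spec_parse_nist_kat_file content (parse_nist_kat_file content)

-- ===== LEMMAS AND PROOFS =====

-- A's loop body after the strip / skip test
def katBodyA (st : List (PySem.Dict String String) × PySem.Dict String String) (line : String) :
    List (PySem.Dict String String) × PySem.Dict String String :=
  let st' := if PySem.Str.startswith line "count =" then
               ((if st.2.items = [] then st.1 else st.1 ++ [st.2]), PySem.Dict.empty)
             else st
  (st'.1, kvInsert st'.2 line)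

-- B's third pass as a function
def katCollect (gs : List (List String)) : List (PySem.Dict String String) :=
  gs.foldl (fun res g =>
      let d := katBuild g
      if d.items = [] then res else res ++ [d]) []

theorem katStepA_eq (st : List (PySem.Dict String String) × PySem.Dict String String) (raw : String) :
    katStepA st raw = if katKeep (PySem.Str.strip raw) then katBodyA st (PySem.Str.strip raw) else st := by
  unfold katStepA katBodyA katKeep
  by_cases h1 : PySem.Str.strip raw = "" <;>
    by_cases h2 : PySem.Chars.startswith (PySem.Chars.strip raw.toList) ['#'] = true <;>
      simp [h1, h2]

theorem katGrow_eq (gs : List (List String)) (s : String) :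
    katGrow gs s = if PySem.Str.startswith s "count =" then gs ++ [[s]]
                   else gs.dropLast ++ [gs.getLastD [] ++ [s]] := by
  unfold katGrow
  by_cases h : PySem.Chars.startswith s.toList ['c','o','u','n','t',' ','='] = true <;> simp [h]

theorem katCollect_concat (gs : List (List String)) (g : List String) :
    katCollect (gs ++ [g]) =
      if (katBuild g).items = [] then katCollect gs else katCollect gs ++ [katBuild g] := by
  unfold katCollect
  rw [List.foldl_append]
  simp only [List.foldl_cons, List.foldl_nil]

theorem katBuild_concat (g : List String) (s : String) :
    katBuild (g ++ [s]) = kvInsert (katBuild g) s := by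
  unfold katBuild
  rw [List.foldl_append]
  simp only [List.foldl_cons, List.foldl_nil]

-- the simulation invariant: A's state after the clean lines L  vs  B's groups after L
theorem katInv (L : List String) :
    (L.foldl katGrow [[]]) ≠ [] ∧
    (L.foldl katBodyA ([], PySem.Dict.empty)).1 = katCollect (L.foldl katGrow [[]]).dropLast ∧
    (L.foldl katBodyA ([], PySem.Dict.empty)).2 = katBuild ((L.foldl katGrow [[]]).getLastD []) := by
  induction L using List.reverseRecOn with
  | nil => exact ⟨by simp, rfl, rfl⟩
  | append_singleton M s ih =>
    obtain ⟨hne, h1, h2⟩ := ih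
    rw [List.foldl_append, List.foldl_append]
    simp only [List.foldl_cons, List.foldl_nil]
    set gs := M.foldl katGrow [[]] with hgs
    set st := M.foldl katBodyA ([], PySem.Dict.empty) with hst
    have hsplit : gs.dropLast ++ [gs.getLastD []] = gs := by
      simp only [List.getLastD_eq_getLast?, List.getLast?_eq_some_getLast hne, Option.getD_some]
      exact List.dropLast_append_getLast hne
    rw [katGrow_eq]
    by_cases hc : PySem.Str.startswith s "count =" = true
    · simp only [hc, if_pos]
      refine ⟨by simp, ?_, ?_⟩
      · show (katBodyA st s).1 = katCollect (gs ++ [[s]]).dropLast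
        rw [List.dropLast_concat]
        conv_rhs => rw [← hsplit]
        rw [katCollect_concat]
        unfold katBodyA
        simp only [hc, if_pos, h1, h2]
      · show (katBodyA st s).2 = katBuild ((gs ++ [[s]]).getLastD [])
        rw [List.getLastD_concat]
        unfold katBodyA
        simp only [hc, if_pos]
        show kvInsert PySem.Dict.empty s = katBuild [s]
        rfl
    · simp only [hc, if_neg, Bool.not_eq_true]
      refine ⟨by simp, ?_, ?_⟩
      · show (katBodyA st s).1 = katCollect (gs.dropLast ++ [gs.getLastD [] ++ [s]]).dropLast
        rw [List.dropLast_concat]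
        unfold katBodyA
        simp only [hc, if_neg, Bool.not_eq_true]
        exact h1
      · show (katBodyA st s).2 = katBuild ((gs.dropLast ++ [gs.getLastD [] ++ [s]]).getLastD [])
        rw [List.getLastD_concat, katBuild_concat]
        unfold katBodyA
        simp only [hc, if_neg, Bool.not_eq_true, h2]

theorem parse_nist_kat_file_spec : Claim_equal_parse_nist_kat_file := by
  intro content _
  show parse_nist_kat_file content = parse_nist_kat_file_alt content
  unfold parse_nist_kat_file parse_nist_kat_file_alt
  have hfold : (PySem.Str.splitlines content).foldl katStepA ([], PySem.Dict.empty) =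
      (((PySem.Str.splitlines content).map PySem.Str.strip).filter katKeep).foldl katBodyA
        ([], PySem.Dict.empty) := by
    have hfn : katStepA = fun st raw =>
        if katKeep (PySem.Str.strip raw) then katBodyA st (PySem.Str.strip raw) else st := by
      funext st raw; exact katStepA_eq st raw
    rw [hfn, ← PySem.List.foldl_if_eq_foldl_filter, List.foldl_map]
  rw [hfold]
  set L := ((PySem.Str.splitlines content).map PySem.Str.strip).filter katKeep with hL
  obtain ⟨hne, h1, h2⟩ := katInv L
  set gs := L.foldl katGrow [[]] with hgs
  have hsplit : gs.dropLast ++ [gs.getLastD []] = gs := by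
    simp only [List.getLastD_eq_getLast?, List.getLast?_eq_some_getLast hne, Option.getD_some]
    exact List.dropLast_append_getLast hne
  show (let st := L.foldl katBodyA ([], PySem.Dict.empty);
        (if st.2.items = [] then st.1 else st.1 ++ [st.2]).map (·.items)) =
       (katCollect gs).map (·.items)
  simp only [h1, h2]
  conv_rhs => rw [← hsplit, katCollect_concat]
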